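-- pv_equiv track=rewrite | github.com/sunjae0902/backjoon | 프로그래머스/2/250136. ［PCCP 기출문제］ 2번 ／ 석유 시추/［PCCP 기출문제］ 2번 ／ 석유 시추.py | solution
-- ===== SOURCE A (Python) =====
-- from collections import deque
--
-- def solution(land):
--     answer = 0
--     m = len(land[0])
--     n = len(land)
--     results = [0] * m
--     visited = [[0 for _ in range(m)] for _ in range(n)]
--     def bfs(r, c):
--         dist = [(-1, 0), (1, 0), (0, 1), (0, -1)]
--         s = deque([(r,c)])
--         res = 1
--         visited_col = {c} # 중복 방지하기 위해 이미 방문한 열에 표시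
--         while s:
--             now = s.popleft()
--             for d in dist:
--                 nr, nc = now[0]+d[0], now[1]+d[1]
--                 if 0 <= nr < n and 0 <= nc < m and not visited[nr][nc]:
--                     if land[nr][nc] == 1:
--                         res += 1
--                         visited[nr][nc] = 1
--                         s.append((nr, nc))
--                         visited_col.add(nc)
--         for c in visited_col:
--             results[c] += res
--
--     for i in range(m):
--         tmp = 0
--         for j in range(n):
--             if land[j][i] == 1 and not visited[j][i]:
--                 visited[j][i] = 1
--                 bfs(j, i)
--     answer = max(results) # 시작 행, 열
--     return answer
-- ===== SOURCE B (Python) =====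
-- def solution(land):
--     n = len(land)
--     m = len(land[0])
--     ones = {(r, c) for r in range(n) for c in range(m) if land[r][c] == 1}
--     seen = set()
--     comps = []
--     for i in range(m):
--         for j in range(n):
--             if (j, i) in ones and (j, i) not in seen:
--                 comp = {(j, i)}
--                 frontier = {(j, i)}
--                 while frontier:
--                     frontier = {(r + dr, c + dc)
--                                 for (r, c) in frontier
--                                 for (dr, dc) in ((-1, 0), (1, 0), (0, 1), (0, -1))
--                                 if (r + dr, c + dc) in ones
--                                 and (r + dr, c + dc) not in seen
--                                 and (r + dr, c + dc) not in comp}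
--                     comp |= frontier
--                 seen |= comp
--                 comps.append((len(comp), {c for (_, c) in comp}))
--     return max(sum(size for (size, cols) in comps if i in cols) for i in range(m))
-- ===== Notes on version B (the rewrite author's own statement) =====
-- stated objective: alternative
-- what changed: A grows each component with a deque BFS over a mutable visited grid and patches a shared per-column results array inside every bfs call; B uses no queue and no visited grid: it precomputes the set of 1-cells, grows each component by set-algebra level expansion (a frontier set expanded until empty), collects (size, column-set) pairs, and only at the end computes each column's total with a comprehension over the component list.
import Mathlib
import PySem

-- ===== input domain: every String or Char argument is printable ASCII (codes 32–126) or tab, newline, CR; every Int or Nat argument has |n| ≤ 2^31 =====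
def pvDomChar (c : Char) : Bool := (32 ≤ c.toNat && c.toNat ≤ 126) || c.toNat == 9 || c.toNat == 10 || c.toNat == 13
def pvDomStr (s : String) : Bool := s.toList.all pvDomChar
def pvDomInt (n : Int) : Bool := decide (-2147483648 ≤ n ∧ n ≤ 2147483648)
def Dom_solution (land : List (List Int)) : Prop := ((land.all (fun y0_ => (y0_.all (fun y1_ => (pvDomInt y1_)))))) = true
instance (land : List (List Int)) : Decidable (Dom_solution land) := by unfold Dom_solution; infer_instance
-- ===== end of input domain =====

-- B replaces A's per-seed queue BFS over a visited grid by set-algebra saturation (expand a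
-- frontier set level by level until it is empty) and A's incremental per-column result array by
-- a two-phase component-list-then-per-column-sum aggregation; objective: alternative.
-- (neither version mutates its argument)

-- ===== PORT A =====
def pvDirsA : List (Int × Int) := [(-1,0),(1,0),(0,1),(0,-1)]

-- g[r][c]: used only after the '0 <= r < n and 0 <= c < m' check (rows have ≥ m entries by Pre_), where it is exact
def pvCellA (g : List (List Int)) (r c : Int) : Int := (g.getD r.toNat []).getD c.toNat 0

-- visited[r][c] = 1 (same in-range discipline)
def pvMarkA (g : List (List Int)) (r c : Int) : List (List Int) :=
  g.set r.toNat ((g.getD r.toNat []).set c.toNat 1)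

-- results[c] += v: c is a stored column, 0 ≤ c < m = len(results), where this is exact
def pvAddAt (results : List Int) (c v : Int) : List Int :=
  results.set c.toNat (results.getD c.toNat 0 + v)

-- the 'for d in dist:' body for one popped cell ('not visited[nr][nc]' on the stored 0/1 ints is '= 0')
def pvProcA (land : List (List Int)) (n m : Int)
    (st : List (List Int) × List (Int × Int) × Int × PySem.Set Int) (now : Int × Int) :
    List (List Int) × List (Int × Int) × Int × PySem.Set Int :=
  pvDirsA.foldl (fun st d =>
    if 0 ≤ now.1 + d.1 ∧ now.1 + d.1 < n ∧ 0 ≤ now.2 + d.2 ∧ now.2 + d.2 < m ∧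
        pvCellA st.1 (now.1 + d.1) (now.2 + d.2) = 0 then
      if pvCellA land (now.1 + d.1) (now.2 + d.2) = 1 then
        (pvMarkA st.1 (now.1 + d.1) (now.2 + d.2), st.2.1 ++ [(now.1 + d.1, now.2 + d.2)],
         st.2.2.1 + 1, PySem.Set.add st.2.2.2 (now.2 + d.2))
      else st
    else st) st

-- the 'while s:' queue loop; the fuel n*m+1 provably suffices (each iteration pops one cell,
-- and every pushed cell was freshly marked, so pushes ≤ n*m), so this is the Python loop exactly
def pvBfsA (land : List (List Int)) (n m : Int) :
    Nat → List (List Int) × List (Int × Int) × Int × PySem.Set Int →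
    List (List Int) × List (Int × Int) × Int × PySem.Set Int
  | 0, st => st
  | fuel+1, st =>
    match st.2.1 with
    | [] => st
    | now :: rest => pvBfsA land n m fuel (pvProcA land n m (st.1, rest, st.2.2.1, st.2.2.2) now)

-- bfs(r, c): run the queue loop, then 'for c in visited_col: results[c] += res'
def pvBfsCall (land : List (List Int)) (n m : Int) (results : List Int)
    (visited : List (List Int)) (r c : Int) : List Int × List (List Int) :=
  let st := pvBfsA land n m (n.toNat * m.toNat + 1) (visited, [(r, c)], 1, PySem.Set.ofList [c])
  (st.2.2.2.foldl (fun acc cc => pvAddAt acc cc st.2.2.1) results, st.1)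

def solution (land : List (List Int)) : Int :=
  let m : Int := (((PySem.List.pyGet? land 0).getD []).length : Int)  -- len(land[0]); land = [] raises, excluded by Pre_
  let n : Int := (land.length : Int)
  let fin := (PySem.List.pyRange 0 m 1).foldl (fun rv i =>
    (PySem.List.pyRange 0 n 1).foldl (fun rv j =>
      if pvCellA land j i = 1 ∧ pvCellA rv.2 j i = 0 then
        pvBfsCall land n m rv.1 (pvMarkA rv.2 j i) j i
      else rv) rv)
    (List.replicate m.toNat (0:Int), List.replicate n.toNat (List.replicate m.toNat (0:Int)))
  (PySem.List.max? fin.1 (fun x => x)).getD 0  -- max(results); m = 0 raises, excluded by Pre_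

-- ===== PORT B =====
def pvDirsB : List (Int × Int) := [(-1,0),(1,0),(0,1),(0,-1)]

def pvCellB (g : List (List Int)) (r c : Int) : Int := (g.getD r.toNat []).getD c.toNat 0

-- {(r, c) for r in range(n) for c in range(m) if land[r][c] == 1}
def pvOnes (land : List (List Int)) (n m : Int) : PySem.Set (Int × Int) :=
  PySem.Set.ofList ((PySem.List.pyRange 0 n 1).flatMap (fun r =>
    ((PySem.List.pyRange 0 m 1).filter (fun c => pvCellB land r c == 1)).map (fun c => (r, c))))

-- the next frontier: unseen drillable neighbours of the current frontier not yet collected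
def pvFrontier (ones seen comp frontier : PySem.Set (Int × Int)) : PySem.Set (Int × Int) :=
  PySem.Set.ofList (frontier.flatMap (fun p =>
    (pvDirsB.filter (fun d =>
      decide ((p.1 + d.1, p.2 + d.2) ∈ ones ∧ (p.1 + d.1, p.2 + d.2) ∉ seen ∧
        (p.1 + d.1, p.2 + d.2) ∉ comp))).map
        (fun d => (p.1 + d.1, p.2 + d.2))))

-- the 'while frontier:' loop of B; the fuel n*m+1 provably suffices (every round with a
-- nonempty frontier strictly grows comp, which has at most n*m cells), so this is the loop exactly
def pvSatB (ones seen : PySem.Set (Int × Int)) :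
    Nat → PySem.Set (Int × Int) × PySem.Set (Int × Int) → PySem.Set (Int × Int)
  | 0, st => st.1
  | fuel + 1, st =>
    if st.2 = [] then st.1
    else
      pvSatB ones seen fuel
        (PySem.Set.update st.1 (pvFrontier ones seen st.1 st.2), pvFrontier ones seen st.1 st.2)

def solution_alt (land : List (List Int)) : Int :=
  let n : Int := (land.length : Int)
  let m : Int := (((PySem.List.pyGet? land 0).getD []).length : Int)
  let ones := pvOnes land n m
  let fin := (PySem.List.pyRange 0 m 1).foldl (fun sc i =>
    (PySem.List.pyRange 0 n 1).foldl (fun sc j =>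
      if (j, i) ∈ ones ∧ (j, i) ∉ sc.1 then
        let comp := pvSatB ones sc.1 (n.toNat * m.toNat + 1)
          (PySem.Set.ofList [(j, i)], PySem.Set.ofList [(j, i)])
        (PySem.Set.update sc.1 comp,
         sc.2 ++ [((comp.length : Int), (PySem.Set.ofList (comp.map Prod.snd) : PySem.Set Int))])
      else sc) sc)
    ((PySem.Set.empty : PySem.Set (Int × Int)), ([] : List (Int × PySem.Set Int)))
  (PySem.List.max? ((PySem.List.pyRange 0 m 1).map (fun i =>
      ((fin.2.filter (fun p => i ∈ p.2)).map Prod.fst).sum)) (fun x => x)).getD 0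

-- ===== PRECONDITION & SPEC =====
-- Exactly where the Python A returns: a nonempty grid, a nonempty first row, and every row at
-- least as long as the first (A reads only columns < len(land[0]); shorter rows raise IndexError,
-- an empty results list raises ValueError in max).
def Pre_solution (land : List (List Int)) : Prop :=
  land ≠ [] ∧ 0 < (land.headD []).length ∧ ∀ row ∈ land, (land.headD []).length ≤ row.length
instance (land : List (List Int)) : Decidable (Pre_solution land) := by unfold Pre_solution; infer_instance

def pvWitness_solution : List (List Int) := [[1, 0], [1, 1]]

def Spec_solution (land : List (List Int)) (out : Int) : Prop := out = solution_alt land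
instance (land : List (List Int)) (out : Int) : Decidable (Spec_solution land out) := by unfold Spec_solution; infer_instance

-- ===== CLAIM (what is proved, stated in full; the proofs are below) =====
def Claim_equal_solution : Prop := ∀ (land : List (List Int)), Dom_solution land → Pre_solution land → Spec_solution land (solution land)


-- ===== LEMMAS AND PROOFS =====

-- the four neighbours of a cell, as a finite set
def pvNbrs (p : Int × Int) : Finset (Int × Int) :=
  {(p.1 - 1, p.2), (p.1 + 1, p.2), (p.1, p.2 + 1), (p.1, p.2 - 1)}

-- "drillable cell": in range and holding 1 (reads via the same getD discipline as both ports)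
abbrev pvOk (land : List (List Int)) (nn mm : Nat) (p : Int × Int) : Prop :=
  0 ≤ p.1 ∧ p.1 < (nn : Int) ∧ 0 ≤ p.2 ∧ p.2 < (mm : Int) ∧ pvCellA land p.1 p.2 = 1

def pvOkCells (land : List (List Int)) (nn mm : Nat) : Finset (Int × Int) :=
  (((Finset.range nn) ×ˢ (Finset.range mm)).image (fun rc => ((rc.1 : Int), (rc.2 : Int)))).filter
    (fun p => pvCellA land p.1 p.2 = 1)

-- the still-unseen drillable cells a component scan may use
def pvU (land : List (List Int)) (nn mm : Nat) (V : Finset (Int × Int)) : Finset (Int × Int) :=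
  (pvOkCells land nn mm).filter (fun q => q ∉ V)

-- one synchronous expansion round on cell sets (the mathematical core both programs compute)
def pvExpand (land : List (List Int)) (nn mm : Nat) (V X : Finset (Int × Int)) : Finset (Int × Int) :=
  X ∪ (X.biUnion pvNbrs).filter (fun q => pvOk land nn mm q ∧ q ∉ V)

-- the component of seed s0 (nn*mm rounds reach the fixpoint)
def pvF (land : List (List Int)) (nn mm : Nat) (V : Finset (Int × Int)) (s0 : Int × Int) : Finset (Int × Int) :=
  (pvExpand land nn mm V)^[nn * mm] {s0}

lemma mem_pvOkCells (land : List (List Int)) (nn mm : Nat) (p : Int × Int) :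
    p ∈ pvOkCells land nn mm ↔ pvOk land nn mm p := by
  unfold pvOkCells
  simp only [Finset.mem_filter, Finset.mem_image, Finset.mem_product, Finset.mem_range]
  constructor
  · rintro ⟨⟨⟨r, c⟩, ⟨hr, hc⟩, rfl⟩, h1⟩
    exact ⟨by positivity, by simpa using (by exact_mod_cast hr : (r : Int) < nn),
      by positivity, by simpa using (by exact_mod_cast hc : (c : Int) < mm), h1⟩
  · rintro ⟨h0, h1, h2, h3, h4⟩
    refine ⟨⟨(p.1.toNat, p.2.toNat), ⟨by omega, by omega⟩, ?_⟩, h4⟩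
    simp only
    rw [Int.toNat_of_nonneg h0, Int.toNat_of_nonneg h2]

lemma card_pvOkCells_le (land : List (List Int)) (nn mm : Nat) :
    (pvOkCells land nn mm).card ≤ nn * mm := by
  calc (pvOkCells land nn mm).card
      ≤ (((Finset.range nn) ×ˢ (Finset.range mm)).image
          (fun rc => ((rc.1 : Int), (rc.2 : Int)))).card := Finset.card_filter_le _ _
    _ ≤ ((Finset.range nn) ×ˢ (Finset.range mm)).card := Finset.card_image_le
    _ = nn * mm := by simp

lemma mem_pvU (land : List (List Int)) (nn mm : Nat) (V : Finset (Int × Int)) (q : Int × Int) :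
    q ∈ pvU land nn mm V ↔ pvOk land nn mm q ∧ q ∉ V := by
  simp [pvU, Finset.mem_filter, mem_pvOkCells]

lemma mem_pvExpand (land : List (List Int)) (nn mm : Nat) (V X : Finset (Int × Int)) (q : Int × Int) :
    q ∈ pvExpand land nn mm V X ↔ q ∈ X ∨ (q ∈ pvU land nn mm V ∧ ∃ p ∈ X, q ∈ pvNbrs p) := by
  simp only [pvExpand, Finset.mem_union, Finset.mem_filter, Finset.mem_biUnion, mem_pvU]
  tauto

lemma subset_pvExpand (land : List (List Int)) (nn mm : Nat) (V X : Finset (Int × Int)) :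
    X ⊆ pvExpand land nn mm V X := Finset.subset_union_left

lemma pvExpand_subset (land : List (List Int)) (nn mm : Nat) (V X S : Finset (Int × Int))
    (hXS : X ⊆ S) (hU : pvU land nn mm V ⊆ S) : pvExpand land nn mm V X ⊆ S := by
  intro q hq
  rcases (mem_pvExpand land nn mm V X q).mp hq with h | ⟨hU', _⟩
  · exact hXS h
  · exact hU hU' 

-- generic: an inflationary map on finsets inside a finite bound S reaches a fixpoint within S.card steps
lemma pvFixAux {a : Type} [DecidableEq a] (f : Finset a → Finset a)
    (hin : ∀ X, X ⊆ f X) (S : Finset a) (hS : ∀ X, X ⊆ S → f X ⊆ S)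
    (X0 : Finset a) (h0 : X0 ⊆ S) (hne : X0.Nonempty) (k : Nat) (hk : S.card ≤ k) :
    f (f^[k] X0) = f^[k] X0 := by
  have hsub : ∀ j, f^[j] X0 ⊆ S := by
    intro j
    induction j with
    | zero => exact h0
    | succ j ih => rw [Function.iterate_succ_apply']; exact hS _ ih
  have key : ∀ j, (f (f^[j] X0) = f^[j] X0) ∨ X0.card + j ≤ (f^[j] X0).card := by
    intro j
    induction j with
    | zero => right; simp
    | succ j ih =>
      by_cases hfix : f (f^[j] X0) = f^[j] X0
      · left
        rw [Function.iterate_succ_apply', hfix, hfix]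
      · rcases ih with h | h
        · exact absurd h hfix
        · right
          have hss : f^[j] X0 ⊂ f (f^[j] X0) :=
            HasSubset.Subset.ssubset_of_ne (hin _) (fun he => hfix he.symm)
          have hlt := Finset.card_lt_card hss
          rw [Function.iterate_succ_apply']
          omega
  rcases key k with h | h
  · exact h
  · exfalso
    have h1 := Finset.card_le_card (hsub k)
    have h2 : 1 ≤ X0.card := Finset.card_pos.mpr hne
    omega

lemma pvF_fixed (land : List (List Int)) (nn mm : Nat) (V : Finset (Int × Int)) (s0 : Int × Int)
    (hs0 : s0 ∈ pvU land nn mm V) :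
    pvExpand land nn mm V (pvF land nn mm V s0) = pvF land nn mm V s0 := by
  apply pvFixAux (pvExpand land nn mm V) (subset_pvExpand land nn mm V) (pvU land nn mm V)
    (fun X hX => pvExpand_subset land nn mm V X _ hX (subset_refl _))
    _ (Finset.singleton_subset_iff.mpr hs0) (Finset.singleton_nonempty s0)
  calc (pvU land nn mm V).card ≤ (pvOkCells land nn mm).card := Finset.card_filter_le _ _
    _ ≤ nn * mm := card_pvOkCells_le land nn mm

lemma pvF_mem_seed (land : List (List Int)) (nn mm : Nat) (V : Finset (Int × Int)) (s0 : Int × Int) :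
    s0 ∈ pvF land nn mm V s0 := by
  have : ∀ k, ({s0} : Finset (Int × Int)) ⊆ (pvExpand land nn mm V)^[k] {s0} := by
    intro k
    induction k with
    | zero => simp
    | succ k ih =>
      rw [Function.iterate_succ_apply']
      exact ih.trans (subset_pvExpand land nn mm V _)
  exact this (nn * mm) (Finset.mem_singleton_self s0)

lemma pvF_subset_U (land : List (List Int)) (nn mm : Nat) (V : Finset (Int × Int)) (s0 : Int × Int)
    (hs0 : s0 ∈ pvU land nn mm V) : pvF land nn mm V s0 ⊆ pvU land nn mm V := by
  have : ∀ k, (pvExpand land nn mm V)^[k] {s0} ⊆ pvU land nn mm V := by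
    intro k
    induction k with
    | zero => simpa using hs0
    | succ k ih =>
      rw [Function.iterate_succ_apply']
      exact pvExpand_subset land nn mm V _ _ ih (subset_refl _)
  exact this (nn * mm)

-- the visited grid of A represents a finite set of cells
def pvRep (nn mm : Nat) (vis : List (List Int)) (V : Finset (Int × Int)) : Prop :=
  vis.length = nn ∧ (∀ row ∈ vis, row.length = mm) ∧
  (∀ p ∈ V, 0 ≤ p.1 ∧ p.1 < (nn : Int) ∧ 0 ≤ p.2 ∧ p.2 < (mm : Int)) ∧
  ∀ r c : Nat, r < nn → c < mm →
    ((vis.getD r []).getD c 0) = (if ((r : Int), (c : Int)) ∈ V then 1 else 0)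

lemma pvRep_init (nn mm : Nat) :
    pvRep nn mm (List.replicate nn (List.replicate mm (0 : Int))) ∅ := by
  refine ⟨by simp, ?_, by simp, ?_⟩
  · intro row hrow
    rw [List.eq_of_mem_replicate hrow]
    simp
  · intro r c hr hc
    have h1 : (List.replicate nn (List.replicate mm (0 : Int))).getD r [] = List.replicate mm (0 : Int) := by
      rw [List.getD_eq_getElem _ _ (by simpa using hr), List.getElem_replicate]
    rw [h1, List.getD_eq_getElem _ _ (by simpa using hc), List.getElem_replicate]
    simp

lemma pvRep_read (nn mm : Nat) (vis : List (List Int)) (V : Finset (Int × Int))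
    (h : pvRep nn mm vis V) (p : Int × Int)
    (hp : 0 ≤ p.1 ∧ p.1 < (nn : Int) ∧ 0 ≤ p.2 ∧ p.2 < (mm : Int)) :
    pvCellA vis p.1 p.2 = (if p ∈ V then 1 else 0) := by
  obtain ⟨h1, h2, h3, h4⟩ := h
  obtain ⟨hp1, hp2, hp3, hp4⟩ := hp
  have hkey := h4 p.1.toNat p.2.toNat (by omega) (by omega)
  have he : ((p.1.toNat : Int), (p.2.toNat : Int)) = p := by
    apply Prod.ext <;> simp [Int.toNat_of_nonneg hp1, Int.toNat_of_nonneg hp3]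
  rw [he] at hkey
  exact hkey

lemma pvRep_mark (nn mm : Nat) (vis : List (List Int)) (V : Finset (Int × Int))
    (h : pvRep nn mm vis V) (p : Int × Int)
    (hp : 0 ≤ p.1 ∧ p.1 < (nn : Int) ∧ 0 ≤ p.2 ∧ p.2 < (mm : Int)) :
    pvRep nn mm (pvMarkA vis p.1 p.2) (insert p V) := by
  obtain ⟨h1, h2, h3, h4⟩ := h
  obtain ⟨hp1, hp2, hp3, hp4⟩ := hp
  have hvl : p.1.toNat < vis.length := by omega
  have hrow0 : vis.getD p.1.toNat [] ∈ vis := by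
    rw [List.getD_eq_getElem _ _ hvl]; exact List.getElem_mem hvl
  have hrl : (vis.getD p.1.toNat []).length = mm := h2 _ hrow0
  refine ⟨by unfold pvMarkA; rw [List.length_set]; exact h1, ?_, ?_, ?_⟩
  · intro row hrow
    unfold pvMarkA at hrow
    rcases List.mem_or_eq_of_mem_set hrow with h | rfl
    · exact h2 _ h
    · rw [List.length_set]; exact hrl
  · intro q hq
    rcases Finset.mem_insert.mp hq with rfl | hq
    · exact ⟨hp1, hp2, hp3, hp4⟩
    · exact h3 q hq
  · intro r c hr hc
    unfold pvMarkA
    by_cases hR : r = p.1.toNat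
    · rw [hR]
      have hrow : (vis.set p.1.toNat ((vis.getD p.1.toNat []).set p.2.toNat 1)).getD p.1.toNat []
          = (vis.getD p.1.toNat []).set p.2.toNat 1 := by
        rw [List.getD_eq_getElem?_getD, List.getElem?_set_self (by omega)]; rfl
      rw [hrow]
      by_cases hC : c = p.2.toNat
      · rw [hC, List.getD_eq_getElem?_getD, List.getElem?_set_self (by omega)]
        have hpe : ((p.1.toNat : Int), (p.2.toNat : Int)) = p := by
          apply Prod.ext <;> simp [Int.toNat_of_nonneg hp1, Int.toNat_of_nonneg hp3]
        rw [hpe]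
        simp
      · rw [List.getD_eq_getElem?_getD, List.getElem?_set_ne (fun he => hC he.symm),
          ← List.getD_eq_getElem?_getD, h4 p.1.toNat c (by omega) hc]
        have hne : ((p.1.toNat : Int), (c : Int)) ≠ p := by
          intro he
          apply hC
          have := congrArg Prod.snd he
          simp at this
          omega
        simp only [Finset.mem_insert, hne, false_or]
    · have hrow : (vis.set p.1.toNat ((vis.getD p.1.toNat []).set p.2.toNat 1)).getD r []
          = vis.getD r [] := by
        rw [List.getD_eq_getElem?_getD, List.getElem?_set_ne (fun he => hR he.symm),
          ← List.getD_eq_getElem?_getD]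
      rw [hrow, h4 r c hr hc]
      have : ((r : Int), (c : Int)) ≠ p := by
        intro he
        apply hR
        have := congrArg Prod.fst he
        simp at this
        omega
      simp only [Finset.mem_insert, this, false_or]

-- the BFS loop invariant of A (A : ghost set of cells added by this bfs call)
def pvInv (land : List (List Int)) (nn mm : Nat) (V : Finset (Int × Int)) (s0 : Int × Int)
    (A : Finset (Int × Int)) (st : List (List Int) × List (Int × Int) × Int × PySem.Set Int) : Prop :=
  pvRep nn mm st.1 (V ∪ A) ∧
  (∀ x ∈ st.2.1, x ∈ A) ∧ st.2.1.Nodup ∧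
  (∀ p ∈ A, p ∉ st.2.1 → ∀ q ∈ pvNbrs p, q ∈ pvU land nn mm V → q ∈ A) ∧
  s0 ∈ A ∧ A ⊆ pvF land nn mm V s0 ∧
  st.2.2.1 = (A.card : Int) ∧
  st.2.2.2.Nodup ∧ (∀ x, x ∈ st.2.2.2 ↔ x ∈ A.image Prod.snd)

-- the weakened invariant holding while the four directions of 'now' are being processed
def pvInvJ (land : List (List Int)) (nn mm : Nat) (V : Finset (Int × Int)) (s0 : Int × Int)
    (now : Int × Int) (A : Finset (Int × Int))
    (st : List (List Int) × List (Int × Int) × Int × PySem.Set Int) : Prop :=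
  pvRep nn mm st.1 (V ∪ A) ∧
  (∀ x ∈ st.2.1, x ∈ A) ∧ st.2.1.Nodup ∧ now ∉ st.2.1 ∧
  (∀ p ∈ A, p ∉ st.2.1 → p ≠ now → ∀ q ∈ pvNbrs p, q ∈ pvU land nn mm V → q ∈ A) ∧
  s0 ∈ A ∧ A ⊆ pvF land nn mm V s0 ∧
  st.2.2.1 = (A.card : Int) ∧
  st.2.2.2.Nodup ∧ (∀ x, x ∈ st.2.2.2 ↔ x ∈ A.image Prod.snd)

-- one direction of the 'for d in dist' body, as a named function (definitionally the foldl body)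
def pvStep (land : List (List Int)) (nn mm : Nat) (now d : Int × Int)
    (st : List (List Int) × List (Int × Int) × Int × PySem.Set Int) :
    List (List Int) × List (Int × Int) × Int × PySem.Set Int :=
  if 0 ≤ now.1 + d.1 ∧ now.1 + d.1 < (nn : Int) ∧ 0 ≤ now.2 + d.2 ∧ now.2 + d.2 < (mm : Int) ∧
      pvCellA st.1 (now.1 + d.1) (now.2 + d.2) = 0 then
    if pvCellA land (now.1 + d.1) (now.2 + d.2) = 1 then
      (pvMarkA st.1 (now.1 + d.1) (now.2 + d.2), st.2.1 ++ [(now.1 + d.1, now.2 + d.2)],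
       st.2.2.1 + 1, PySem.Set.add st.2.2.2 (now.2 + d.2))
    else st
  else st

-- one direction of the 'for d in dist' body preserves the weak invariant
lemma pvStep1_inv (land : List (List Int)) (nn mm : Nat) (V : Finset (Int × Int)) (s0 now d : Int × Int)
    (A : Finset (Int × Int)) (st : List (List Int) × List (Int × Int) × Int × PySem.Set Int)
    (hs0 : s0 ∈ pvU land nn mm V) (hnow : now ∈ A)
    (hq : (now.1 + d.1, now.2 + d.2) ∈ pvNbrs now)
    (hJ : pvInvJ land nn mm V s0 now A st) :
    ∃ A', A ⊆ A' ∧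
      pvInvJ land nn mm V s0 now A' (pvStep land nn mm now d st) ∧
      ((now.1 + d.1, now.2 + d.2) ∈ pvU land nn mm V → (now.1 + d.1, now.2 + d.2) ∈ A') ∧
      (pvStep land nn mm now d st).2.1.length + A.card = st.2.1.length + A'.card := by
  obtain ⟨vis, q, res, cols⟩ := st
  unfold pvStep
  obtain ⟨hRep, hQ, hQnd, hNowQ, hCl, hs0A, hAF, hRes, hCnd, hCmem⟩ := hJ
  simp only at hRep hQ hQnd hNowQ hCl hRes hCnd hCmem ⊢
  by_cases hcond : 0 ≤ now.1 + d.1 ∧ now.1 + d.1 < (nn : Int) ∧ 0 ≤ now.2 + d.2 ∧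
      now.2 + d.2 < (mm : Int) ∧ pvCellA vis (now.1 + d.1) (now.2 + d.2) = 0
  · rw [if_pos hcond]
    obtain ⟨hb1, hb2, hb3, hb4, hvis0⟩ := hcond
    by_cases hland : pvCellA land (now.1 + d.1) (now.2 + d.2) = 1
    · rw [if_pos hland]
      have hbnds : 0 ≤ (now.1 + d.1, now.2 + d.2).1 ∧ (now.1 + d.1, now.2 + d.2).1 < (nn : Int) ∧
          0 ≤ (now.1 + d.1, now.2 + d.2).2 ∧ (now.1 + d.1, now.2 + d.2).2 < (mm : Int) :=
        ⟨hb1, hb2, hb3, hb4⟩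
      have hread := pvRep_read nn mm vis (V ∪ A) hRep (now.1 + d.1, now.2 + d.2) hbnds
      have hnotVA : (now.1 + d.1, now.2 + d.2) ∉ V ∪ A := by
        intro hmem
        rw [hvis0] at hread
        simp [hmem] at hread
      have hnotV : (now.1 + d.1, now.2 + d.2) ∉ V := fun h => hnotVA (Finset.mem_union_left _ h)
      have hnotA : (now.1 + d.1, now.2 + d.2) ∉ A := fun h => hnotVA (Finset.mem_union_right _ h)
      have hqU : (now.1 + d.1, now.2 + d.2) ∈ pvU land nn mm V :=
        (mem_pvU land nn mm V _).mpr ⟨⟨hb1, hb2, hb3, hb4, hland⟩, hnotV⟩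
      have hqF : (now.1 + d.1, now.2 + d.2) ∈ pvF land nn mm V s0 := by
        rw [← pvF_fixed land nn mm V s0 hs0]
        exact (mem_pvExpand land nn mm V _ _).mpr (Or.inr ⟨hqU, now, hAF hnow, hq⟩)
      have hqnow : (now.1 + d.1, now.2 + d.2) ≠ now := fun h => hnotA (by rw [h]; exact hnow)
      refine ⟨insert (now.1 + d.1, now.2 + d.2) A, Finset.subset_insert _ _, ?_, fun _ => Finset.mem_insert_self _ _, ?_⟩
      · refine ⟨?_, ?_, ?_, ?_, ?_, Finset.mem_insert_of_mem hs0A, ?_, ?_, ?_, ?_⟩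
        · have := pvRep_mark nn mm vis (V ∪ A) hRep (now.1 + d.1, now.2 + d.2) hbnds
          rwa [← Finset.union_insert] at this
        · intro x hx
          rcases List.mem_append.mp hx with h | h
          · exact Finset.mem_insert_of_mem (hQ x h)
          · rw [List.mem_singleton.mp h]; exact Finset.mem_insert_self _ _
        · rw [List.nodup_append]
          exact ⟨hQnd, List.nodup_singleton _,
            fun a ha b hb => by rw [List.mem_singleton.mp hb]; exact fun he => hnotA (he ▸ hQ a ha)⟩
        · intro hmem
          rcases List.mem_append.mp hmem with h | h
          · exact hNowQ h
          · exact hqnow (List.mem_singleton.mp h).symm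
        · intro p hp hpq hpnow qq hqq hqqU
          have hpA : p ∈ A := by
            rcases Finset.mem_insert.mp hp with rfl | h
            · exact absurd (List.mem_append.mpr (Or.inr (List.mem_singleton_self _))) hpq
            · exact h
          exact Finset.mem_insert_of_mem (hCl p hpA (fun h => hpq (List.mem_append.mpr (Or.inl h))) hpnow qq hqq hqqU)
        · intro x hx
          rcases Finset.mem_insert.mp hx with rfl | h
          · exact hqF
          · exact hAF h
        · rw [hRes, Finset.card_insert_of_notMem hnotA]
          push_cast
          ring
        · exact PySem.Set.nodup_add cols _ hCnd
        · intro x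
          rw [PySem.Set.mem_add, hCmem x, Finset.image_insert, Finset.mem_insert]
          tauto
      · simp [List.length_append, Finset.card_insert_of_notMem hnotA]
        omega
    · rw [if_neg hland]
      refine ⟨A, subset_refl A, ⟨hRep, hQ, hQnd, hNowQ, hCl, hs0A, hAF, hRes, hCnd, hCmem⟩, ?_, rfl⟩
      intro hqU
      exact absurd ((mem_pvU land nn mm V _).mp hqU).1.2.2.2.2 hland
  · rw [if_neg hcond]
    refine ⟨A, subset_refl A, ⟨hRep, hQ, hQnd, hNowQ, hCl, hs0A, hAF, hRes, hCnd, hCmem⟩, ?_, rfl⟩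
    intro hqU
    obtain ⟨⟨hb1, hb2, hb3, hb4, hland⟩, hnotV⟩ := (mem_pvU land nn mm V _).mp hqU
    by_cases hVA : (now.1 + d.1, now.2 + d.2) ∈ V ∪ A
    · rcases Finset.mem_union.mp hVA with h | h
      · exact absurd h hnotV
      · exact h
    · exfalso
      apply hcond
      refine ⟨hb1, hb2, hb3, hb4, ?_⟩
      rw [pvRep_read nn mm vis (V ∪ A) hRep (now.1 + d.1, now.2 + d.2) ⟨hb1, hb2, hb3, hb4⟩]
      simp [hVA]


-- processing one popped cell restores the full invariant and strictly decreases the measure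
lemma pvProcA_inv (land : List (List Int)) (nn mm : Nat) (V : Finset (Int × Int)) (s0 now : Int × Int)
    (A : Finset (Int × Int)) (vis : List (List Int)) (rest : List (Int × Int)) (res : Int)
    (cols : PySem.Set Int)
    (hs0 : s0 ∈ pvU land nn mm V)
    (hI : pvInv land nn mm V s0 A (vis, now :: rest, res, cols)) :
    ∃ A', A ⊆ A' ∧
      pvInv land nn mm V s0 A' (pvProcA land (nn : Int) (mm : Int) (vis, rest, res, cols) now) ∧
      (pvProcA land (nn : Int) (mm : Int) (vis, rest, res, cols) now).2.1.length + A.card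
        = rest.length + A'.card := by
  have heq : pvProcA land (nn : Int) (mm : Int) (vis, rest, res, cols) now
      = pvStep land nn mm now (0, -1) (pvStep land nn mm now (0, 1) (pvStep land nn mm now (1, 0)
          (pvStep land nn mm now (-1, 0) (vis, rest, res, cols)))) := rfl
  rw [heq]
  obtain ⟨hRep, hQ, hQnd, hCl, hs0A, hAF, hRes, hCnd, hCmem⟩ := hI
  simp only at hRep hQ hQnd hCl hRes hCnd hCmem
  have hnow : now ∈ A := hQ now List.mem_cons_self
  have hnr : now ∉ rest := (List.nodup_cons.mp hQnd).1
  have hJ0 : pvInvJ land nn mm V s0 now A (vis, rest, res, cols) :=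
    ⟨hRep, fun x hx => hQ x (List.mem_cons_of_mem _ hx), (List.nodup_cons.mp hQnd).2, hnr,
     fun p hp hpq hpn => hCl p hp (fun hm => by
        rcases List.mem_cons.mp hm with h | h
        · exact hpn h
        · exact hpq h),
     hs0A, hAF, hRes, hCnd, hCmem⟩
  obtain ⟨A1, hA1, hJ1, hc1, hm1⟩ := pvStep1_inv land nn mm V s0 now (-1, 0) A _ hs0 hnow
    (by simp [pvNbrs, Prod.ext_iff]; omega) hJ0
  obtain ⟨A2, hA2, hJ2, hc2, hm2⟩ := pvStep1_inv land nn mm V s0 now (1, 0) A1 _ hs0 (hA1 hnow)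
    (by simp [pvNbrs, Prod.ext_iff]) hJ1
  obtain ⟨A3, hA3, hJ3, hc3, hm3⟩ := pvStep1_inv land nn mm V s0 now (0, 1) A2 _ hs0 (hA2 (hA1 hnow))
    (by simp [pvNbrs, Prod.ext_iff]) hJ2
  obtain ⟨A4, hA4, hJ4, hc4, hm4⟩ := pvStep1_inv land nn mm V s0 now (0, -1) A3 _ hs0 (hA3 (hA2 (hA1 hnow)))
    (by simp [pvNbrs, Prod.ext_iff]; omega) hJ3
  have h14 : A1 ⊆ A4 := fun x hx => hA4 (hA3 (hA2 hx))
  have h24 : A2 ⊆ A4 := fun x hx => hA4 (hA3 hx)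
  obtain ⟨kRep, kQ, kQnd, kNowQ, kCl, ks0, kAF, kRes, kCnd, kCmem⟩ := hJ4
  refine ⟨A4, fun x hx => hA4 (hA3 (hA2 (hA1 hx))), ⟨kRep, kQ, kQnd, ?_, ks0, kAF, kRes, kCnd, kCmem⟩, ?_⟩
  · intro p hp hpq qq hqq hqU
    by_cases hpn : p = now
    · subst hpn
      simp only [pvNbrs, Finset.mem_insert, Finset.mem_singleton] at hqq
      rcases hqq with rfl | rfl | rfl | rfl
      · have e : (p.1 - 1, p.2) = (p.1 + ((-1 : Int), (0 : Int)).1, p.2 + ((-1 : Int), (0 : Int)).2) := by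
          apply Prod.ext <;> simp [Int.sub_eq_add_neg]
        rw [e] at hqU ⊢
        exact h14 (hc1 hqU)
      · have e : (p.1 + 1, p.2) = (p.1 + ((1 : Int), (0 : Int)).1, p.2 + ((1 : Int), (0 : Int)).2) := by
          apply Prod.ext <;> simp
        rw [e] at hqU ⊢
        exact h24 (hc2 hqU)
      · have e : (p.1, p.2 + 1) = (p.1 + ((0 : Int), (1 : Int)).1, p.2 + ((0 : Int), (1 : Int)).2) := by
          apply Prod.ext <;> simp
        rw [e] at hqU ⊢
        exact hA4 (hc3 hqU)
      · have e : (p.1, p.2 - 1) = (p.1 + ((0 : Int), (-1 : Int)).1, p.2 + ((0 : Int), (-1 : Int)).2) := by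
          apply Prod.ext <;> simp [Int.sub_eq_add_neg]
        rw [e] at hqU ⊢
        exact hc4 hqU
    · exact kCl p hp hpq hpn qq hqq hqU
  · simp only at hm1 hm2 hm3 hm4 ⊢
    omega

-- a state with an empty queue is the whole component
lemma pvInv_closed (land : List (List Int)) (nn mm : Nat) (V : Finset (Int × Int)) (s0 : Int × Int)
    (A : Finset (Int × Int)) (st : List (List Int) × List (Int × Int) × Int × PySem.Set Int)
    (hI : pvInv land nn mm V s0 A st) (hq : st.2.1 = []) :
    A = pvF land nn mm V s0 := by
  obtain ⟨hRep, hQ, hQnd, hCl, hs0A, hAF, hRes, hCnd, hCmem⟩ := hI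
  rw [hq] at hCl
  refine subset_antisymm hAF ?_
  have : ∀ k, (pvExpand land nn mm V)^[k] {s0} ⊆ A := by
    intro k
    induction k with
    | zero => simpa using hs0A
    | succ k ih =>
      rw [Function.iterate_succ_apply']
      intro qq hqq
      rcases (mem_pvExpand land nn mm V _ qq).mp hqq with h | ⟨hU, p, hp, hnb⟩
      · exact ih h
      · exact hCl p (ih hp) List.not_mem_nil qq hnb hU
  exact this (nn * mm)

-- the queue loop terminates within the fuel and ends in the component
lemma pvBfsA_run (land : List (List Int)) (nn mm : Nat) (V : Finset (Int × Int)) (s0 : Int × Int)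
    (hs0 : s0 ∈ pvU land nn mm V) :
    ∀ (fuel : Nat) (A : Finset (Int × Int))
      (st : List (List Int) × List (Int × Int) × Int × PySem.Set Int),
      pvInv land nn mm V s0 A st →
      st.2.1.length + ((pvF land nn mm V s0).card - A.card) < fuel →
      ∃ A', pvInv land nn mm V s0 A' (pvBfsA land (nn : Int) (mm : Int) fuel st) ∧
        (pvBfsA land (nn : Int) (mm : Int) fuel st).2.1 = [] := by
  intro fuel
  induction fuel with
  | zero => intro A st hI hm; omega
  | succ f ih =>
    intro A st hI hm
    obtain ⟨vis, q, res, cols⟩ := st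
    cases q with
    | nil => exact ⟨A, hI, rfl⟩
    | cons now rest =>
      have heq : pvBfsA land (nn : Int) (mm : Int) (f + 1) (vis, now :: rest, res, cols)
          = pvBfsA land (nn : Int) (mm : Int) f
              (pvProcA land (nn : Int) (mm : Int) (vis, rest, res, cols) now) := rfl
      rw [heq]
      obtain ⟨A', hAA', hI', hm'⟩ := pvProcA_inv land nn mm V s0 now A vis rest res cols hs0 hI
      apply ih A' _ hI'
      have hcA : A.card ≤ (pvF land nn mm V s0).card := by
        obtain ⟨_, _, _, _, _, hAF, _⟩ := hI
        exact Finset.card_le_card hAF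
      have hcA' : A'.card ≤ (pvF land nn mm V s0).card := by
        obtain ⟨_, _, _, _, _, hAF, _⟩ := hI'
        exact Finset.card_le_card hAF
      simp only at hm hm' ⊢
      simp only [List.length_cons] at hm
      omega

-- the per-column result update: adding v at each distinct stored column
lemma pvFoldAddAt (v : Int) : ∀ (cs : List Int) (results : List Int), cs.Nodup →
    (∀ c ∈ cs, 0 ≤ c) →
    (cs.foldl (fun acc cc => pvAddAt acc cc v) results).length = results.length ∧
    ∀ i : Nat, i < results.length →
      (cs.foldl (fun acc cc => pvAddAt acc cc v) results).getD i 0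
        = results.getD i 0 + (if ((i : Int) ∈ cs) then v else 0) := by
  intro cs
  induction cs with
  | nil => intro results _ _; simp
  | cons c t ih =>
    intro results hnd hnn
    have hlen : (pvAddAt results c v).length = results.length := List.length_set
    obtain ⟨ih1, ih2⟩ := ih (pvAddAt results c v) hnd.of_cons (fun x hx => hnn x (List.mem_cons_of_mem c hx))
    rw [List.foldl_cons]
    refine ⟨by rw [ih1, hlen], ?_⟩
    intro i hi
    rw [ih2 i (by omega)]
    have hc0 : 0 ≤ c := hnn c List.mem_cons_self
    by_cases hceq : (i : Int) = c
    · have hct : c.toNat = i := by omega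
      have hgi : (pvAddAt results c v).getD i 0 = results.getD i 0 + v := by
        unfold pvAddAt
        rw [hct, List.getD_eq_getElem?_getD, List.getElem?_set_self hi]
        simp [List.getD_eq_getElem?_getD]
      have hnotmem : c ∉ t := (List.nodup_cons.mp hnd).1
      rw [hgi, hceq]
      simp [hnotmem]
    · have hgi : (pvAddAt results c v).getD i 0 = results.getD i 0 := by
        unfold pvAddAt
        rw [List.getD_eq_getElem?_getD, List.getElem?_set_ne (by omega), ← List.getD_eq_getElem?_getD]
      rw [hgi]
      simp [List.mem_cons, hceq]

-- full effect of one bfs(r, c) call of A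
lemma pvBfsCall_spec (land : List (List Int)) (nn mm : Nat) (V : Finset (Int × Int)) (s0 : Int × Int)
    (results : List Int) (vis : List (List Int))
    (hs0 : s0 ∈ pvU land nn mm V) (hrep : pvRep nn mm vis V) (hres : results.length = mm) :
    pvRep nn mm (pvBfsCall land (nn : Int) (mm : Int) results (pvMarkA vis s0.1 s0.2) s0.1 s0.2).2
      (V ∪ pvF land nn mm V s0) ∧
    (pvBfsCall land (nn : Int) (mm : Int) results (pvMarkA vis s0.1 s0.2) s0.1 s0.2).1.length = mm ∧
    ∀ i : Nat, i < mm →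
      (pvBfsCall land (nn : Int) (mm : Int) results (pvMarkA vis s0.1 s0.2) s0.1 s0.2).1.getD i 0
        = results.getD i 0 +
          (if ((i : Int) ∈ (pvF land nn mm V s0).image Prod.snd)
            then ((pvF land nn mm V s0).card : Int) else 0) := by
  obtain ⟨⟨hb1, hb2, hb3, hb4, hl⟩, hnV⟩ := (mem_pvU land nn mm V s0).mp hs0
  have hFfix := pvF_fixed land nn mm V s0 hs0
  have hs0F := pvF_mem_seed land nn mm V s0
  have hFU := pvF_subset_U land nn mm V s0 hs0
  have hFcard : (pvF land nn mm V s0).card ≤ nn * mm :=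
    le_trans (Finset.card_le_card (hFU.trans (Finset.filter_subset _ _))) (card_pvOkCells_le land nn mm)
  have hRep1 : pvRep nn mm (pvMarkA vis s0.1 s0.2) (V ∪ {s0}) := by
    have := pvRep_mark nn mm vis V hrep s0 ⟨hb1, hb2, hb3, hb4⟩
    rwa [show insert s0 V = V ∪ ({s0} : Finset (Int × Int)) from by
      rw [Finset.union_comm, Finset.singleton_union]] at this
  have hI0 : pvInv land nn mm V s0 {s0}
      (pvMarkA vis s0.1 s0.2, [s0], 1, PySem.Set.ofList [s0.2]) := by
    unfold pvInv
    dsimp only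
    refine ⟨hRep1, ?_, List.nodup_singleton _, ?_, Finset.mem_singleton_self s0,
      Finset.singleton_subset_iff.mpr hs0F, by simp, PySem.Set.nodup_ofList _, ?_⟩
    · intro x hx
      rw [List.mem_singleton.mp hx]
      exact Finset.mem_singleton_self s0
    · intro p hp hpq
      exact absurd (by rw [Finset.mem_singleton.mp hp]; exact List.mem_singleton.mpr rfl) hpq
    · intro x
      rw [PySem.Set.mem_ofList]
      simp
  have hFpos : 0 < (pvF land nn mm V s0).card := Finset.card_pos.mpr ⟨s0, hs0F⟩
  obtain ⟨A', hI', hq'⟩ := pvBfsA_run land nn mm V s0 hs0 (nn * mm + 1) {s0}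
    (pvMarkA vis s0.1 s0.2, [s0], 1, PySem.Set.ofList [s0.2]) hI0
    (by dsimp only; simp only [List.length_singleton, Finset.card_singleton]; omega)
  have hAF' := pvInv_closed land nn mm V s0 A' _ hI' hq'
  subst hAF'
  obtain ⟨kRep, kQ, kQnd, kCl, ks0, kAF, kRes, kCnd, kCmem⟩ := hI'
  have hfuel : ((nn : Int)).toNat * ((mm : Int)).toNat + 1 = nn * mm + 1 := by
    simp
  have hcall : pvBfsCall land (nn : Int) (mm : Int) results (pvMarkA vis s0.1 s0.2) s0.1 s0.2
      = ((pvBfsA land (nn : Int) (mm : Int) (nn * mm + 1)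
            (pvMarkA vis s0.1 s0.2, [s0], 1, PySem.Set.ofList [s0.2])).2.2.2.foldl
          (fun acc cc => pvAddAt acc cc (pvBfsA land (nn : Int) (mm : Int) (nn * mm + 1)
            (pvMarkA vis s0.1 s0.2, [s0], 1, PySem.Set.ofList [s0.2])).2.2.1) results,
         (pvBfsA land (nn : Int) (mm : Int) (nn * mm + 1)
            (pvMarkA vis s0.1 s0.2, [s0], 1, PySem.Set.ofList [s0.2])).1) := by
    unfold pvBfsCall
    rw [hfuel]
  have hcolnn : ∀ c ∈ (pvBfsA land (nn : Int) (mm : Int) (nn * mm + 1)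
      (pvMarkA vis s0.1 s0.2, [s0], 1, PySem.Set.ofList [s0.2])).2.2.2, 0 ≤ c := by
    intro c hc
    obtain ⟨p, hpF, rfl⟩ := Finset.mem_image.mp ((kCmem c).mp hc)
    exact ((mem_pvU land nn mm V p).mp (hFU hpF)).1.2.2.1
  obtain ⟨hL, hG⟩ := pvFoldAddAt ((pvBfsA land (nn : Int) (mm : Int) (nn * mm + 1)
      (pvMarkA vis s0.1 s0.2, [s0], 1, PySem.Set.ofList [s0.2])).2.2.1)
    ((pvBfsA land (nn : Int) (mm : Int) (nn * mm + 1)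
      (pvMarkA vis s0.1 s0.2, [s0], 1, PySem.Set.ofList [s0.2])).2.2.2) results kCnd hcolnn
  refine ⟨?_, ?_, ?_⟩
  · rw [hcall]
    exact kRep
  · rw [hcall]
    dsimp only
    rw [hL, hres]
  · intro i hi
    rw [hcall]
    dsimp only
    rw [hG i (by omega), kRes]
    simp only [kCmem]

-- ===== B-side lemmas =====
lemma mem_pvOnes (land : List (List Int)) (nn mm : Nat) (q : Int × Int) :
    q ∈ pvOnes land (nn : Int) (mm : Int) ↔ pvOk land nn mm q := by
  unfold pvOnes
  rw [PySem.Set.mem_ofList]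
  simp only [List.mem_flatMap, List.mem_map, List.mem_filter, PySem.List.mem_pyRange_one]
  constructor
  · rintro ⟨r, ⟨hr0, hr1⟩, c, ⟨⟨hc0, hc1⟩, h1⟩, rfl⟩
    exact ⟨hr0, hr1, hc0, hc1, by simpa using (beq_iff_eq.mp h1)⟩
  · rintro ⟨h0, h1, h2, h3, h4⟩
    exact ⟨q.1, ⟨h0, h1⟩, q.2, ⟨⟨h2, h3⟩, beq_iff_eq.mpr h4⟩, rfl⟩

lemma mem_pvNbrs_iff (p q : Int × Int) :
    q ∈ pvNbrs p ↔ ∃ d ∈ pvDirsB, q = (p.1 + d.1, p.2 + d.2) := by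
  constructor
  · intro h
    simp only [pvNbrs, Finset.mem_insert, Finset.mem_singleton] at h
    rcases h with rfl | rfl | rfl | rfl
    · exact ⟨(-1, 0), by simp [pvDirsB], by apply Prod.ext <;> simp [Int.sub_eq_add_neg]⟩
    · exact ⟨(1, 0), by simp [pvDirsB], by apply Prod.ext <;> simp⟩
    · exact ⟨(0, 1), by simp [pvDirsB], by apply Prod.ext <;> simp⟩
    · exact ⟨(0, -1), by simp [pvDirsB], by apply Prod.ext <;> simp [Int.sub_eq_add_neg]⟩
  · rintro ⟨d, hd, rfl⟩
    simp only [pvDirsB, List.mem_cons, List.not_mem_nil, or_false] at hd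
    rcases hd with rfl | rfl | rfl | rfl <;>
      simp [pvNbrs, Prod.ext_iff] <;> omega

lemma pvIterate_infl (land : List (List Int)) (nn mm : Nat) (V : Finset (Int × Int))
    (X : Finset (Int × Int)) : ∀ k, X ⊆ (pvExpand land nn mm V)^[k] X := by
  intro k
  induction k with
  | zero => simp
  | succ k ih =>
    rw [Function.iterate_succ_apply']
    exact ih.trans (subset_pvExpand land nn mm V _)

lemma pvIterate_mono_count (land : List (List Int)) (nn mm : Nat) (V : Finset (Int × Int))
    (X : Finset (Int × Int)) (j j' : Nat) (h : j ≤ j') :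
    (pvExpand land nn mm V)^[j] X ⊆ (pvExpand land nn mm V)^[j'] X := by
  rw [show j' = (j' - j) + j from by omega, Function.iterate_add_apply]
  exact pvIterate_infl land nn mm V _ _

lemma pvIterate_subset_U (land : List (List Int)) (nn mm : Nat) (V : Finset (Int × Int))
    (s0 : Int × Int) (hs0 : s0 ∈ pvU land nn mm V) :
    ∀ k, (pvExpand land nn mm V)^[k] {s0} ⊆ pvU land nn mm V := by
  intro k
  induction k with
  | zero => simpa using hs0
  | succ k ih =>
    rw [Function.iterate_succ_apply']
    exact pvExpand_subset land nn mm V _ _ ih (subset_refl _)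

lemma pvCardU_le (land : List (List Int)) (nn mm : Nat) (V : Finset (Int × Int)) :
    (pvU land nn mm V).card ≤ nn * mm :=
  le_trans (Finset.card_filter_le _ _) (card_pvOkCells_le land nn mm)

lemma pvFrontier_spec (land : List (List Int)) (nn mm : Nat) (V : Finset (Int × Int))
    (ones seen comp frontier : PySem.Set (Int × Int))
    (hone : ∀ q, q ∈ ones ↔ pvOk land nn mm q) (hseen : ∀ x, x ∈ seen ↔ x ∈ V) :
    (pvFrontier ones seen comp frontier).Nodup ∧
    ∀ q, q ∈ pvFrontier ones seen comp frontier ↔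
      (q ∈ pvU land nn mm V ∧ q ∉ comp ∧ ∃ p ∈ frontier, q ∈ pvNbrs p) := by
  refine ⟨PySem.Set.nodup_ofList _, ?_⟩
  intro q
  unfold pvFrontier
  rw [PySem.Set.mem_ofList]
  simp only [List.mem_flatMap, List.mem_map, List.mem_filter, decide_eq_true_eq, mem_pvU]
  constructor
  · rintro ⟨p, hp, d, ⟨hd, h1, h2, h3⟩, rfl⟩
    exact ⟨⟨(hone _).mp h1, fun hV => h2 ((hseen _).mpr hV)⟩, h3, p, hp,
      (mem_pvNbrs_iff p _).mpr ⟨d, hd, rfl⟩⟩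
  · rintro ⟨⟨hok, hV⟩, hnc, p, hp, hnb⟩
    obtain ⟨d, hd, rfl⟩ := (mem_pvNbrs_iff p q).mp hnb
    exact ⟨p, hp, d, ⟨hd, (hone _).mpr hok, fun hs => hV ((hseen _).mp hs), hnc⟩, rfl⟩

-- the invariant of B's frontier loop after k rounds
def pvSInv (land : List (List Int)) (nn mm : Nat) (V : Finset (Int × Int)) (s0 : Int × Int)
    (k : Nat) (comp frontier : PySem.Set (Int × Int)) : Prop :=
  comp.Nodup ∧ frontier.Nodup ∧ (∀ x ∈ frontier, x ∈ comp) ∧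
  comp.toFinset = (pvExpand land nn mm V)^[k] {s0} ∧
  (∀ p, p ∈ comp → p ∉ frontier → ∀ q ∈ pvNbrs p, q ∈ pvU land nn mm V → q ∈ comp) ∧
  (frontier ≠ [] → k + 1 ≤ comp.toFinset.card) ∧
  k ≤ comp.toFinset.card

lemma pvSClosed (land : List (List Int)) (nn mm : Nat) (V : Finset (Int × Int)) (s0 : Int × Int)
    (k : Nat) (comp : PySem.Set (Int × Int)) (hs0 : s0 ∈ pvU land nn mm V)
    (hI : pvSInv land nn mm V s0 k comp []) :
    comp.toFinset = pvF land nn mm V s0 := by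
  obtain ⟨hnd, _, _, hit, hcl, _, hk⟩ := hI
  have hsub : comp.toFinset ⊆ pvU land nn mm V := by
    rw [hit]
    exact pvIterate_subset_U land nn mm V s0 hs0 k
  have hknm : k ≤ nn * mm :=
    le_trans (hk.trans (Finset.card_le_card hsub)) (pvCardU_le land nn mm V)
  apply subset_antisymm
  · rw [hit]
    exact pvIterate_mono_count land nn mm V _ k (nn * mm) hknm
  · have hall : ∀ j, (pvExpand land nn mm V)^[j] {s0} ⊆ comp.toFinset := by
      intro j
      induction j with
      | zero =>
        rw [hit]
        simpa using pvIterate_infl land nn mm V {s0} k (Finset.mem_singleton_self s0)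
      | succ j ih =>
        rw [Function.iterate_succ_apply']
        intro q hq
        rcases (mem_pvExpand land nn mm V _ q).mp hq with h | ⟨hU, p, hp, hnb⟩
        · exact ih h
        · exact List.mem_toFinset.mpr
            (hcl p (List.mem_toFinset.mp (ih hp)) List.not_mem_nil q hnb hU)
    exact hall (nn * mm)

lemma pvSatB_run (land : List (List Int)) (nn mm : Nat) (V : Finset (Int × Int)) (s0 : Int × Int)
    (ones seen : PySem.Set (Int × Int))
    (hone : ∀ q, q ∈ ones ↔ pvOk land nn mm q) (hseen : ∀ x, x ∈ seen ↔ x ∈ V)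
    (hs0 : s0 ∈ pvU land nn mm V) :
    ∀ (fuel k : Nat) (comp frontier : PySem.Set (Int × Int)),
      pvSInv land nn mm V s0 k comp frontier → nn * mm + 1 ≤ fuel + k →
      (pvSatB ones seen fuel (comp, frontier)).Nodup ∧
      (pvSatB ones seen fuel (comp, frontier)).toFinset = pvF land nn mm V s0 := by
  intro fuel
  induction fuel with
  | zero =>
    intro k comp frontier hI hfuel
    have hfe : frontier = [] := by
      by_contra hne
      obtain ⟨_, _, _, hit, _, h6, _⟩ := hI
      have h1 := h6 hne
      have hsub : comp.toFinset ⊆ pvU land nn mm V := by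
        rw [hit]
        exact pvIterate_subset_U land nn mm V s0 hs0 k
      have h2 : comp.toFinset.card ≤ nn * mm :=
        le_trans (Finset.card_le_card hsub) (pvCardU_le land nn mm V)
      omega
    subst hfe
    exact ⟨hI.1, pvSClosed land nn mm V s0 k comp hs0 hI⟩
  | succ f ih =>
    intro k comp frontier hI hfuel
    by_cases hfe : frontier = []
    · subst hfe
      rw [show pvSatB ones seen (f + 1) (comp, []) = comp from by simp [pvSatB]]
      exact ⟨hI.1, pvSClosed land nn mm V s0 k comp hs0 hI⟩
    · rw [show pvSatB ones seen (f + 1) (comp, frontier)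
          = pvSatB ones seen f (PySem.Set.update comp (pvFrontier ones seen comp frontier),
              pvFrontier ones seen comp frontier) from by simp [pvSatB, hfe]]
      obtain ⟨c1, c2, c3, c4, c5, c6, c7⟩ := hI
      obtain ⟨fnd, fmem⟩ := pvFrontier_spec land nn mm V ones seen comp frontier hone hseen
      have hsubup : comp.toFinset ⊆ (PySem.Set.update comp (pvFrontier ones seen comp frontier)).toFinset := by
        intro x hx
        exact List.mem_toFinset.mpr ((PySem.Set.mem_update _ _ _).mpr (Or.inl (List.mem_toFinset.mp hx)))
      have hnewfin : (PySem.Set.update comp (pvFrontier ones seen comp frontier)).toFinset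
          = (pvExpand land nn mm V)^[k + 1] {s0} := by
        ext q
        rw [List.mem_toFinset, PySem.Set.mem_update, Function.iterate_succ_apply',
          mem_pvExpand, ← c4]
        constructor
        · rintro (h | h)
          · exact Or.inl (List.mem_toFinset.mpr h)
          · obtain ⟨hU, hnc, p, hp, hnb⟩ := (fmem q).mp h
            exact Or.inr ⟨hU, p, List.mem_toFinset.mpr (c3 p hp), hnb⟩
        · rintro (h | ⟨hU, p, hp, hnb⟩)
          · exact Or.inl (List.mem_toFinset.mp h)
          · by_cases hqc : q ∈ comp
            · exact Or.inl hqc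
            · by_cases hpf : p ∈ frontier
              · exact Or.inr ((fmem q).mpr ⟨hU, hqc, p, hpf, hnb⟩)
              · exact Or.inl (c5 p (List.mem_toFinset.mp hp) hpf q hnb hU)
      have hstep : pvSInv land nn mm V s0 (k + 1)
          (PySem.Set.update comp (pvFrontier ones seen comp frontier))
          (pvFrontier ones seen comp frontier) := by
        refine ⟨PySem.Set.nodup_update _ _ c1, fnd, ?_, hnewfin, ?_, ?_, ?_⟩
        · intro x hx
          exact (PySem.Set.mem_update _ _ _).mpr (Or.inr hx)
        · intro p hp hpf q hnb hU
          rcases (PySem.Set.mem_update _ _ _).mp hp with hpc | hpf'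
          · by_cases hpfr : p ∈ frontier
            · by_cases hqc : q ∈ comp
              · exact (PySem.Set.mem_update _ _ _).mpr (Or.inl hqc)
              · exact (PySem.Set.mem_update _ _ _).mpr
                  (Or.inr ((fmem q).mpr ⟨hU, hqc, p, hpfr, hnb⟩))
            · exact (PySem.Set.mem_update _ _ _).mpr (Or.inl (c5 p hpc hpfr q hnb hU))
          · exact absurd hpf' hpf
        · intro hne
          obtain ⟨q, hq⟩ := List.exists_mem_of_ne_nil _ hne
          have hqnc : q ∉ comp := ((fmem q).mp hq).2.1
          have hss : comp.toFinset ⊂ (PySem.Set.update comp (pvFrontier ones seen comp frontier)).toFinset := by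
            refine ⟨hsubup, fun hback => hqnc ?_⟩
            exact List.mem_toFinset.mp (hback (List.mem_toFinset.mpr
              ((PySem.Set.mem_update _ _ _).mpr (Or.inr hq))))
          have := Finset.card_lt_card hss
          have h6' := c6 hfe
          omega
        · have h6' := c6 hfe
          have := Finset.card_le_card hsubup
          omega
      exact ih (k + 1) _ _ hstep (by omega)

-- ===== coupling of the two outer scans =====
def pvCouple (nn mm : Nat)
    (rv : List Int × List (List Int)) (sc : PySem.Set (Int × Int) × List (Int × PySem.Set Int)) : Prop :=
  ∃ V : Finset (Int × Int), pvRep nn mm rv.2 V ∧ sc.1.Nodup ∧ (∀ x, x ∈ sc.1 ↔ x ∈ V) ∧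
    rv.1.length = mm ∧
    ∀ i : Nat, i < mm → rv.1.getD i 0 = ((sc.2.filter (fun p => (i : Int) ∈ p.2)).map Prod.fst).sum

lemma pvFoldRel {a b c : Type} (R : b → c → Prop) (l : List a) (fB : b → a → b) (fC : c → a → c)
    (hstep : ∀ x ∈ l, ∀ y z, R y z → R (fB y x) (fC z x)) :
    ∀ y z, R y z → R (l.foldl fB y) (l.foldl fC z) := by
  induction l with
  | nil => intro y z h; exact h
  | cons x t ih =>
    intro y z h
    exact ih (fun u hu => hstep u (List.mem_cons_of_mem x hu)) _ _
      (hstep x (List.mem_cons_self) y z h)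

lemma pvCellStep (land : List (List Int)) (nn mm : Nat) (i j : Int)
    (hi : 0 ≤ i ∧ i < (mm : Int)) (hj : 0 ≤ j ∧ j < (nn : Int))
    (rv : List Int × List (List Int)) (sc : PySem.Set (Int × Int) × List (Int × PySem.Set Int))
    (h : pvCouple nn mm rv sc) :
    pvCouple nn mm
      (if pvCellA land j i = 1 ∧ pvCellA rv.2 j i = 0 then
        pvBfsCall land (nn : Int) (mm : Int) rv.1 (pvMarkA rv.2 j i) j i
      else rv)
      (if (j, i) ∈ pvOnes land (nn : Int) (mm : Int) ∧ (j, i) ∉ sc.1 then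
        ((PySem.Set.update sc.1 (pvSatB (pvOnes land (nn : Int) (mm : Int)) sc.1 (nn * mm + 1)
            (PySem.Set.ofList [(j, i)], PySem.Set.ofList [(j, i)]))),
          sc.2 ++ [(((pvSatB (pvOnes land (nn : Int) (mm : Int)) sc.1 (nn * mm + 1)
            (PySem.Set.ofList [(j, i)], PySem.Set.ofList [(j, i)])).length : Int),
            (PySem.Set.ofList ((pvSatB (pvOnes land (nn : Int) (mm : Int)) sc.1 (nn * mm + 1)
            (PySem.Set.ofList [(j, i)], PySem.Set.ofList [(j, i)])).map Prod.snd) : PySem.Set Int))])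
      else sc) := by
  obtain ⟨V, hRep, hSnd, hSmem, hLen, hRes⟩ := h
  have hbnds : 0 ≤ ((j, i) : Int × Int).1 ∧ ((j, i) : Int × Int).1 < (nn : Int) ∧
      0 ≤ ((j, i) : Int × Int).2 ∧ ((j, i) : Int × Int).2 < (mm : Int) := ⟨hj.1, hj.2, hi.1, hi.2⟩
  by_cases hg : pvCellA land j i = 1 ∧ pvCellA rv.2 j i = 0
  · have hok : pvOk land nn mm (j, i) := ⟨hj.1, hj.2, hi.1, hi.2, hg.1⟩
    have hnotV : (j, i) ∉ V := by
      intro hmem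
      have hread := pvRep_read nn mm rv.2 V hRep (j, i) hbnds
      rw [hg.2] at hread
      simp [hmem] at hread
    have hB : (j, i) ∈ pvOnes land (nn : Int) (mm : Int) ∧ (j, i) ∉ sc.1 :=
      ⟨(mem_pvOnes land nn mm (j, i)).mpr hok, fun hm => hnotV ((hSmem _).mp hm)⟩
    rw [if_pos hg, if_pos hB]
    have hs0 : (j, i) ∈ pvU land nn mm V := (mem_pvU land nn mm V _).mpr ⟨hok, hnotV⟩
    have hof : (PySem.Set.ofList [((j : Int), (i : Int))]) = [(j, i)] := by
      simp [PySem.Set.ofList, PySem.Set.add]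
    have hInv0 : pvSInv land nn mm V (j, i) 0 (PySem.Set.ofList [(j, i)])
        (PySem.Set.ofList [(j, i)]) := by
      rw [hof]
      refine ⟨List.nodup_singleton _, List.nodup_singleton _, fun x hx => hx, by simp, ?_, ?_, ?_⟩
      · intro p hp hpf
        exact absurd hp hpf
      · intro _
        simp
      · simp
    obtain ⟨hCnd, hCfin'⟩ := pvSatB_run land nn mm V (j, i)
      (pvOnes land (nn : Int) (mm : Int)) sc.1 (fun q => mem_pvOnes land nn mm q) hSmem hs0
      (nn * mm + 1) 0 (PySem.Set.ofList [(j, i)]) (PySem.Set.ofList [(j, i)]) hInv0 (by omega)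
    obtain ⟨hA1, hA2, hA3⟩ := pvBfsCall_spec land nn mm V (j, i) rv.1 rv.2 hs0 hRep hLen
    refine ⟨V ∪ pvF land nn mm V (j, i), hA1, PySem.Set.nodup_update _ _ hSnd, ?_, hA2, ?_⟩
    · intro x
      rw [PySem.Set.mem_update, Finset.mem_union, hSmem x, ← hCfin', List.mem_toFinset]
    · intro k hk
      rw [hA3 k hk, hRes k hk]
      dsimp only
      rw [List.filter_append, List.map_append, List.sum_append]
      congr 1
      have hmemiff : ((k : Int) ∈ PySem.Set.ofList ((pvSatB (pvOnes land (nn : Int) (mm : Int))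
          sc.1 (nn * mm + 1) (PySem.Set.ofList [(j, i)], PySem.Set.ofList [(j, i)])).map Prod.snd))
          ↔ ((k : Int) ∈ (pvF land nn mm V (j, i)).image Prod.snd) := by
        rw [PySem.Set.mem_ofList, List.mem_map]
        constructor
        · rintro ⟨p, hp, hpk⟩
          exact hpk ▸ Finset.mem_image_of_mem _ (hCfin' ▸ List.mem_toFinset.mpr hp)
        · intro hmem
          obtain ⟨p, hpF, hpk⟩ := Finset.mem_image.mp hmem
          exact ⟨p, List.mem_toFinset.mp (hCfin' ▸ hpF : p ∈ _), hpk⟩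
      have hlencomp : ((pvSatB (pvOnes land (nn : Int) (mm : Int)) sc.1 (nn * mm + 1)
          (PySem.Set.ofList [(j, i)], PySem.Set.ofList [(j, i)])).length : Int)
          = ((pvF land nn mm V (j, i)).card : Int) := by
        rw [← hCfin', List.toFinset_card_of_nodup hCnd]
      by_cases hkmem : (k : Int) ∈ (pvF land nn mm V (j, i)).image Prod.snd
      · rw [if_pos hkmem]
        rw [List.filter_cons]
        simp only [decide_eq_true_eq, hmemiff, hkmem, if_true, List.filter_nil, List.map_cons,
          List.map_nil, List.sum_cons, List.sum_nil, add_zero]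
        exact hlencomp.symm
      · rw [if_neg hkmem]
        rw [List.filter_cons]
        simp only [decide_eq_true_eq, hmemiff, hkmem, if_false, List.filter_nil, List.map_nil,
          List.sum_nil]
  · have hB : ¬((j, i) ∈ pvOnes land (nn : Int) (mm : Int) ∧ (j, i) ∉ sc.1) := by
      rintro ⟨h1, h2⟩
      apply hg
      have hok := (mem_pvOnes land nn mm (j, i)).mp h1
      refine ⟨hok.2.2.2.2, ?_⟩
      rw [pvRep_read nn mm rv.2 V hRep (j, i) hbnds]
      simp only [ite_eq_right_iff]
      intro hmem
      exact absurd ((hSmem _).mpr hmem) h2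
    rw [if_neg hg, if_neg hB]
    exact ⟨V, hRep, hSnd, hSmem, hLen, hRes⟩

-- a results array determined pointwise by the component list is the mapped range
lemma pvFinish (mm : Nat) (ra : List Int) (comps : List (Int × PySem.Set Int))
    (hLen : ra.length = mm)
    (hSum : ∀ i : Nat, i < mm →
      ra.getD i 0 = ((comps.filter (fun p => ((i : Int) ∈ p.2))).map Prod.fst).sum) :
    ra = (PySem.List.pyRange 0 (mm : Int) 1).map
      (fun i => ((comps.filter (fun p => (i ∈ p.2))).map Prod.fst).sum) := by
  rw [PySem.List.pyRange_zero_natCast]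
  apply List.ext_getElem
  · rw [hLen]
    simp
  · intro k h1 h2
    rw [← List.getD_eq_getElem ra 0 h1, List.getElem_map, List.getElem_map, List.getElem_range]
    exact hSum k (by omega)

-- the two outer scans, coupled end to end
lemma pvMainFold (land : List (List Int)) (mm : Nat) :
    pvCouple land.length mm
      ((PySem.List.pyRange 0 (mm : Int) 1).foldl (fun rv i =>
        (PySem.List.pyRange 0 ((land.length : Nat) : Int) 1).foldl (fun rv j =>
          if pvCellA land j i = 1 ∧ pvCellA rv.2 j i = 0 then
            pvBfsCall land ((land.length : Nat) : Int) (mm : Int) rv.1 (pvMarkA rv.2 j i) j i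
          else rv) rv)
        (List.replicate mm (0 : Int), List.replicate land.length (List.replicate mm (0 : Int))))
      ((PySem.List.pyRange 0 (mm : Int) 1).foldl (fun sc i =>
        (PySem.List.pyRange 0 ((land.length : Nat) : Int) 1).foldl (fun sc j =>
          if (j, i) ∈ pvOnes land ((land.length : Nat) : Int) (mm : Int) ∧ (j, i) ∉ sc.1 then
            ((PySem.Set.update sc.1 (pvSatB (pvOnes land ((land.length : Nat) : Int) (mm : Int))
                sc.1 (land.length * mm + 1) (PySem.Set.ofList [(j, i)], PySem.Set.ofList [(j, i)]))),
              sc.2 ++ [(((pvSatB (pvOnes land ((land.length : Nat) : Int) (mm : Int)) sc.1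
                (land.length * mm + 1) (PySem.Set.ofList [(j, i)], PySem.Set.ofList [(j, i)])).length : Int),
                (PySem.Set.ofList ((pvSatB (pvOnes land ((land.length : Nat) : Int) (mm : Int)) sc.1
                (land.length * mm + 1) (PySem.Set.ofList [(j, i)], PySem.Set.ofList [(j, i)])).map Prod.snd) : PySem.Set Int))])
          else sc) sc)
        ((PySem.Set.empty : PySem.Set (Int × Int)), ([] : List (Int × PySem.Set Int)))) := by
  apply pvFoldRel (pvCouple land.length mm) (PySem.List.pyRange 0 (mm : Int) 1)
  · intro i hiR rv sc hc
    apply pvFoldRel (pvCouple land.length mm) (PySem.List.pyRange 0 ((land.length : Nat) : Int) 1)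
    · intro j hjR rv' sc' hc'
      exact pvCellStep land land.length mm i j
        (by exact PySem.List.mem_pyRange_one.mp hiR)
        (by exact PySem.List.mem_pyRange_one.mp hjR) rv' sc' hc'
    · exact hc
  · refine ⟨∅, pvRep_init land.length mm, List.nodup_nil, by simp [PySem.Set.empty], by simp, ?_⟩
    intro k hk
    rw [List.getD_eq_getElem _ _ (by simpa using hk), List.getElem_replicate]
    simp

-- ===== VERDICT (by name: the statement is the Claim_ definition above) =====
theorem solution_spec : Claim_equal_solution := by
  intro land hdom hpre
  unfold Spec_solution
  obtain ⟨hne, hm0, hrows⟩ := hpre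
  cases land with
  | nil => exact absurd rfl hne
  | cons r0 rest =>
    have hget : (PySem.List.pyGet? (r0 :: rest) 0).getD [] = r0 := by
      simp [PySem.List.pyGet?, PySem.List.pyIdx?]
    simp only [solution, solution_alt, hget, Int.toNat_natCast]
    obtain ⟨V, _hrep, _h1, _h2, hLen, hSum⟩ := pvMainFold (r0 :: rest) r0.length
    rw [pvFinish r0.length _ _ hLen hSum]
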